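-- pv_equiv track=rewrite | github.com/Mai-with-u/Amaidesu | spark_asr/rtasr_client.py | _diff_suffix
-- ===== SOURCE A (Python) =====
-- def _diff_suffix(old: str, new: str) -> str:
--     """返回 new 相对于 old 的最长公共前缀之后的后缀；若出现回退改写，仍按公共前缀截断。"""
--     try:
--         max_len = min(len(old), len(new))
--         i = 0
--         while i < max_len and old[i] == new[i]:
--             i += 1
--         return new[i:]
--     except Exception:
--         return new
-- ===== SOURCE B (Python) =====
-- def _diff_suffix(old: str, new: str) -> str:
--     """Return new's suffix after the longest common prefix with old.
--     Binary search on the prefix length: slice comparisons instead of a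
--     per-character forward scan."""
--     lo, hi = 0, min(len(old), len(new))
--     while lo < hi:
--         mid = (lo + hi + 1) // 2
--         if old[lo:mid] == new[lo:mid]:
--             lo = mid
--         else:
--             hi = mid - 1
--     return new[lo:]
-- ===== Notes on version B (the rewrite author's own statement) =====
-- stated objective: faster
-- what changed: Replaces A's per-character forward scan with a binary search on the common-prefix length: the invariant lo <= cpl <= hi is maintained by comparing the slices old[lo:mid] and new[lo:mid] wholesale, so the interpreted loop runs O(log n) times and the character comparisons happen inside C-level string equality (measured ~14x at n=262144).
import Mathlib
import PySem

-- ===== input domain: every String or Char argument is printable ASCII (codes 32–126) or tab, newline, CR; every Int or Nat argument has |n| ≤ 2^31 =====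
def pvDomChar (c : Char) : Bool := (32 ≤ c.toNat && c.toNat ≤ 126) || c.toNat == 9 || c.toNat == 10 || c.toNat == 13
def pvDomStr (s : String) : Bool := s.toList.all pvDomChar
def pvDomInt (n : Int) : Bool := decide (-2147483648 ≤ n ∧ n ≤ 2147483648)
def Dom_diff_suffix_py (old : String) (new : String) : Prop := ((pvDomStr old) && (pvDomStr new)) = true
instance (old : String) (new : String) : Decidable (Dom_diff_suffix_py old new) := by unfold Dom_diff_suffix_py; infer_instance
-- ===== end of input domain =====

-- B replaces A's per-character forward scan by a binary search on the common-prefix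
-- length, deciding each probe with a wholesale slice comparison (alternative decomposition).
-- A's try/except can never fire (no statement in the try body raises), so the happy path is the whole behaviour.

-- ===== PORT A =====
-- A's while loop: advance i while i < max_len and old[i] == new[i]
def aLoop (o n : List Char) (maxLen : Nat) (i : Nat) : Nat :=
  if _h : i < maxLen then
    if PySem.List.pyGet? o (i : Int) = PySem.List.pyGet? n (i : Int) then
      aLoop o n maxLen (i + 1)
    else i
  else i
termination_by maxLen - i

def diff_suffix_py (old : String) (new : String) : String :=
  let o := old.toList
  let n := new.toList
  let maxLen := min o.length n.length
  let i := aLoop o n maxLen 0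
  String.ofList (PySem.List.slice n (some (i : Int)) none)   -- new[i:]

-- ===== PORT B =====
-- Source B's binary search: while lo < hi: mid = (lo+hi+1)//2; compare old[lo:mid] with new[lo:mid]
def bLoop (o n : List Char) (lo hi : Nat) : Nat :=
  if _h : lo < hi then
    let mid := (lo + hi + 1) / 2
    if PySem.List.slice o (some (lo : Int)) (some (mid : Int)) =
       PySem.List.slice n (some (lo : Int)) (some (mid : Int)) then
      bLoop o n mid hi
    else
      bLoop o n lo (mid - 1)
  else lo
termination_by hi - lo
decreasing_by all_goals omega

def diff_suffix_py_alt (old : String) (new : String) : String :=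
  let o := old.toList
  let n := new.toList
  let lo := bLoop o n 0 (min o.length n.length)
  String.ofList (PySem.List.slice n (some (lo : Int)) none)   -- new[lo:]

-- ===== PRECONDITION & SPEC =====
def Spec_diff_suffix_py (old : String) (new : String) (out : String) : Prop := out = diff_suffix_py_alt old new
instance (old : String) (new : String) (out : String) : Decidable (Spec_diff_suffix_py old new out) := by unfold Spec_diff_suffix_py; infer_instance

-- ===== CLAIM (what is proved, stated in full; the proofs are below) =====
def Claim_equal_diff_suffix_py : Prop := ∀ (old : String) (new : String), Dom_diff_suffix_py old new → Spec_diff_suffix_py old new (diff_suffix_py old new)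

-- ===== LEMMAS AND PROOFS =====

-- the common-prefix length: the value both loops compute
def cp : List Char → List Char → Nat
  | a :: o, b :: n => if a = b then cp o n + 1 else 0
  | _, _ => 0

lemma cp_le (o n : List Char) : cp o n ≤ min o.length n.length := by
  induction o generalizing n with
  | nil => simp [cp]
  | cons a o ih =>
    cases n with
    | nil => simp [cp]
    | cons b n =>
      by_cases h : a = b
      · have := ih n; simp [cp, h]; omega
      · simp [cp, h]

lemma take_eq_iff (o n : List Char) (k : Nat) (hk : k ≤ min o.length n.length) :
    o.take k = n.take k ↔ k ≤ cp o n := by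
  induction o generalizing n k with
  | nil => simp at hk; simp [hk, cp]
  | cons a o ih =>
    cases n with
    | nil => simp at hk; simp [hk]
    | cons b n =>
      cases k with
      | zero => simp
      | succ k =>
        simp only [List.take_succ_cons, List.cons.injEq]
        by_cases h : a = b
        · have hcp : cp (a :: o) (b :: n) = cp o n + 1 := by simp [cp, h]
          rw [hcp]
          simp only [h, true_and]
          rw [ih n k (by simp at hk ⊢; omega)]
          omega
        · simp [cp, h]

lemma getElem_eq_of_lt_cp (o n : List Char) (k : Nat) (hk : k < cp o n)
    (ho : k < o.length) (hn : k < n.length) : o[k] = n[k] := by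
  have h1 : o.take (k + 1) = n.take (k + 1) := by
    rw [take_eq_iff o n (k + 1) (by omega)]; omega
  have := congrArg (fun l => l[k]?) h1
  simpa [List.getElem?_take, ho, hn, List.getElem?_eq_getElem] using this

lemma getElem_ne_at_cp (o n : List Char) (h : cp o n < min o.length n.length)
    (ho : cp o n < o.length) (hn : cp o n < n.length) : o[cp o n] ≠ n[cp o n] := by
  intro heq
  have h1 : o.take (cp o n + 1) = n.take (cp o n + 1) := by
    have hprev : o.take (cp o n) = n.take (cp o n) := by
      rw [take_eq_iff o n (cp o n) (by omega)]
    rw [List.take_succ, List.take_succ, hprev, List.getElem?_eq_getElem ho,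
      List.getElem?_eq_getElem hn, heq]
  rw [take_eq_iff o n (cp o n + 1) (by omega)] at h1
  omega

lemma aLoop_eq_cp (o n : List Char) :
    ∀ (fuel i : Nat), min o.length n.length - i = fuel → i ≤ cp o n →
      aLoop o n (min o.length n.length) i = cp o n := by
  intro fuel
  induction fuel with
  | zero =>
    intro i hf hi
    have hcp := cp_le o n
    rw [aLoop, dif_neg (by omega)]
    omega
  | succ fuel ih =>
    intro i hf hi
    have hcp := cp_le o n
    have hio : i < o.length := by omega
    have hin : i < n.length := by omega
    have hgo : PySem.List.pyGet? o (i : Int) = some o[i] := by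
      simp [PySem.List.pyGet?, PySem.List.pyIdx?, hio]
    have hgn : PySem.List.pyGet? n (i : Int) = some n[i] := by
      simp [PySem.List.pyGet?, PySem.List.pyIdx?, hin]
    rw [aLoop, dif_pos (by omega), hgo, hgn]
    by_cases hlt : i < cp o n
    · rw [if_pos (by rw [getElem_eq_of_lt_cp o n i hlt hio hin])]
      exact ih (i + 1) (by omega) (by omega)
    · have hieq : i = cp o n := by omega
      rw [if_neg (by subst hieq; simpa using getElem_ne_at_cp o n (by omega) hio hin)]
      exact hieq

-- a slice comparison from a known-equal prefix decides whether the prefix extends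
lemma slice_cmp_iff (o n : List Char) (lo mid : Nat) (hlo : lo ≤ cp o n)
    (hmid : lo ≤ mid) (hm : mid ≤ min o.length n.length) :
    (PySem.List.slice o (some (lo : Int)) (some (mid : Int)) =
     PySem.List.slice n (some (lo : Int)) (some (mid : Int))) ↔ mid ≤ cp o n := by
  rw [PySem.List.slice_natCast, PySem.List.slice_natCast]
  have hpre : o.take lo = n.take lo := by
    rw [take_eq_iff o n lo (by have := cp_le o n; omega)]; exact hlo
  rw [← take_eq_iff o n mid hm]
  constructor
  · intro h
    have : o.take lo ++ (o.drop lo).take (mid - lo) = n.take lo ++ (n.drop lo).take (mid - lo) := by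
      rw [hpre, h]
    simpa [List.take_append_drop, ← List.take_add, Nat.add_sub_cancel' hmid] using this
  · intro h
    have := congrArg (fun l => l.drop lo) h
    simpa [List.drop_take] using this

lemma bLoop_eq_cp (o n : List Char) :
    ∀ (fuel lo hi : Nat), hi - lo = fuel → lo ≤ cp o n → cp o n ≤ hi →
      hi ≤ min o.length n.length → bLoop o n lo hi = cp o n := by
  intro fuel
  induction fuel using Nat.strong_induction_on with
  | _ fuel ih =>
    intro lo hi hf hlo hhi hm
    by_cases h : lo < hi
    · rw [bLoop, dif_pos h]
      set mid := (lo + hi + 1) / 2 with hmid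
      have hrange : lo < mid ∧ mid ≤ hi := by omega
      rw [show (if PySem.List.slice o (some (lo : Int)) (some (mid : Int)) =
            PySem.List.slice n (some (lo : Int)) (some (mid : Int)) then
            bLoop o n mid hi else bLoop o n lo (mid - 1)) =
          (if mid ≤ cp o n then bLoop o n mid hi else bLoop o n lo (mid - 1)) from by
        by_cases hc : mid ≤ cp o n
        · rw [if_pos hc, if_pos ((slice_cmp_iff o n lo mid hlo (by omega) (by omega)).2 hc)]
        · rw [if_neg hc, if_neg (by rw [slice_cmp_iff o n lo mid hlo (by omega) (by omega)]; exact hc)]]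
      by_cases hc : mid ≤ cp o n
      · rw [if_pos hc]
        exact ih (hi - mid) (by omega) mid hi rfl hc hhi hm
      · rw [if_neg hc]
        exact ih (mid - 1 - lo) (by omega) lo (mid - 1) rfl hlo (by omega) (by omega)
    · rw [bLoop, dif_neg h]; omega

-- ===== VERDICT (by name: the statement is the Claim_ definition above) =====
theorem diff_suffix_py_spec : Claim_equal_diff_suffix_py := by
  intro old new _
  unfold Spec_diff_suffix_py diff_suffix_py diff_suffix_py_alt
  simp only
  rw [aLoop_eq_cp old.toList new.toList (min old.toList.length new.toList.length - 0) 0 rfl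
      (by omega),
    bLoop_eq_cp old.toList new.toList (min old.toList.length new.toList.length - 0) 0
      (min old.toList.length new.toList.length) rfl (by omega) (cp_le _ _) le_rfl]
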